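-- pv_equiv track=rewrite | github.com/codergirl-al/TUM_P4MS | 04/homework/hw02.py | solution
-- ===== SOURCE A (Python) =====
-- from typing import List
--
-- def solution(lst: List[int]) -> bool:
-- 	n = len(lst)
-- 	for i in range(n):
-- 		if lst[i] == 2:
-- 			if n == 1:
-- 				return False
-- 			prev_idx = (i - 1) % n
-- 			next_idx = (i + 1) % n
-- 			if lst[prev_idx] != 2 and lst[next_idx] != 2:
-- 				return False
-- 	return True
-- ===== SOURCE B (Python) =====
-- from typing import List
--
-- def solution(lst: List[int]) -> bool:
--     # Run-length approach: every circular maximal run of 2s must have length != 1.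
--     n = len(lst)
--     twos = [x == 2 for x in lst]
--     if all(twos):
--         return n != 1  # one circular run of length n (no 2s at all when n == 0)
--     k = twos.index(False)
--     rot = twos[k:] + twos[:k]  # rotate so the list starts at a non-2: no wraparound run
--     run = 0
--     for b in rot:
--         if b:
--             run += 1
--         elif run == 1:
--             return False
--         else:
--             run = 0
--     return run != 1
-- ===== Notes on version B (the rewrite author's own statement) =====
-- stated objective: alternative
-- what changed: Replaces the per-index circular neighbor check with modular arithmetic by a single run-length scan: rotate the list to start at a non-2 (or handle the all-2s case as one circular run) and return False iff some maximal run of 2s has length exactly 1.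
import Mathlib
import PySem

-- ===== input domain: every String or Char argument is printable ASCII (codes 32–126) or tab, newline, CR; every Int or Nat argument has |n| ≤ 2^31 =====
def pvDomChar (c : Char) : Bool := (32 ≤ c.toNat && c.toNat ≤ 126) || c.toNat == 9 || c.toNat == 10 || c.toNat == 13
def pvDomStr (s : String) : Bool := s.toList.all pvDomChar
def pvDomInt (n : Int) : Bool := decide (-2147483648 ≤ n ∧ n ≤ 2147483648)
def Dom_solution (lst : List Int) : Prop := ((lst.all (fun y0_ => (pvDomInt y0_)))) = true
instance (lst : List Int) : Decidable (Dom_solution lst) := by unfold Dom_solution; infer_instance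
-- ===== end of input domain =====

-- B replaces A's per-index circular neighbor test by a run-length scan over the list
-- rotated to start at a non-2 ('alternative': same O(n) cost, different algorithm).

-- ===== PORT A =====
def solutionLoop (lst : List Int) (n : Int) : List Int → Bool
  | [] => true
  | i :: rest =>
    if PySem.List.pyGetD lst i 0 == 2 then
      if n == 1 then false
      else
        if PySem.List.pyGetD lst (PySem.Int.mod (i - 1) n) 0 != 2
            && PySem.List.pyGetD lst (PySem.Int.mod (i + 1) n) 0 != 2 then false
        else solutionLoop lst n rest
    else solutionLoop lst n rest

def solution (lst : List Int) : Bool :=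
  solutionLoop lst (lst.length : Int) (PySem.List.pyRange 0 (lst.length : Int) 1)

-- ===== PORT B =====
def runLoop : List Bool → Int → Bool
  | [], run => run != 1
  | b :: rest, run =>
    if b then runLoop rest (run + 1)
    else if run == 1 then false
    else runLoop rest 0

def solution_alt (lst : List Int) : Bool :=
  let twos := lst.map (fun x => x == 2)
  if twos.all id then ((lst.length : Int) != 1)
  else
    let k : Nat := (PySem.List.index? twos false).getD 0
    let rot := PySem.List.slice twos (some (k : Int)) none ++ PySem.List.slice twos none (some (k : Int))
    runLoop rot 0

-- ===== PRECONDITION & SPEC =====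
def Spec_solution (lst : List Int) (out : Bool) : Prop := out = solution_alt lst
instance (lst : List Int) (out : Bool) : Decidable (Spec_solution lst out) := by unfold Spec_solution; infer_instance

-- ===== CLAIM (what is proved, stated in full; the proofs are below) =====
def Claim_equal_solution : Prop := ∀ (lst : List Int), Dom_solution lst → Spec_solution lst (solution lst)

-- ===== LEMMAS AND PROOFS =====

-- A's per-index bad test, in Nat terms (if-based circular neighbors instead of mod).
def badAtB (lst : List Int) (i : Nat) : Bool :=
  (lst.getD i 0 == 2) &&
    ((lst.length == 1) ||
      ((lst.getD (if i = 0 then lst.length - 1 else i - 1) 0 != 2) &&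
       (lst.getD (if i + 1 = lst.length then 0 else i + 1) 0 != 2)))

def BadB (lst : List Int) : Bool := (List.range lst.length).any (badAtB lst)

-- "some isolated true": an occurrence of the pattern [false, true, false] at position j.
def IsoB (d : List Bool) : Bool :=
  (List.range d.length).any (fun j => !d.getD j true && d.getD (j+1) false && !d.getD (j+2) true)

lemma isoB_cons (a : Bool) (d : List Bool) :
    IsoB (a :: d) = ((!a && d.getD 0 false && !d.getD 1 true) || IsoB d) := by
  simp [IsoB, List.range_succ_eq_map, List.any_map, Function.comp_def]

lemma isoB_trues (r : Nat) (l : List Bool) :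
    IsoB (List.replicate r true ++ false :: l) = IsoB (false :: l) := by
  induction r with
  | zero => simp
  | succ r ih => rw [List.replicate_succ, List.cons_append, isoB_cons, ih]; simp

lemma isoB_spike (r : Nat) (l : List Bool) :
    IsoB (false :: (List.replicate r true ++ false :: l)) = (decide (r = 1) || IsoB (false :: l)) := by
  rw [isoB_cons, isoB_trues]
  match r with
  | 0 => simp
  | 1 => simp [isoB_cons]
  | (s+2) => simp [List.replicate_succ]

lemma runLoop_eq_isoB (cs : List Bool) (r : Nat) :
    runLoop cs (r : Int) = !IsoB (false :: (List.replicate r true ++ (cs ++ [false]))) := by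
  induction cs generalizing r with
  | nil =>
    simp only [List.nil_append]
    have h0 : (List.replicate r true ++ [false]) = (List.replicate r true ++ false :: ([] : List Bool)) := by simp
    rw [runLoop, h0, isoB_spike]
    have h1 : IsoB [false] = false := by decide
    rw [h1]
    by_cases hr : r = 1
    · subst hr; simp
    · have h2 : ((r : Int) != 1) = true := by simp; omega
      simp [hr, h2]
  | cons b rest ih =>
    cases b with
    | true =>
      have h1 : (r : Int) + 1 = ((r + 1 : Nat) : Int) := by push_cast; ring
      rw [runLoop, if_pos rfl, h1, ih (r+1)]
      congr 2
      rw [List.replicate_succ']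
      simp
    | false =>
      rw [runLoop]
      simp only [if_neg (by simp : ¬ (false : Bool) = true)]
      have hl : (List.replicate r true ++ (false :: rest ++ [false])) = (List.replicate r true ++ false :: (rest ++ [false])) := by simp
      rw [hl, isoB_spike]
      by_cases hr : r = 1
      · subst hr; simp
      · have h2 : ((r : Int) == 1) = false := by simp; omega
        rw [h2, if_neg (by simp)]
        have h3 := ih 0
        norm_num at h3
        rw [h3]
        simp [hr]

lemma solutionLoop_eq_all (lst : List Int) (n : Int) (is : List Int) :
    solutionLoop lst n is = is.all (fun i =>
      !((PySem.List.pyGetD lst i 0 == 2) &&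
        ((n == 1) ||
          ((PySem.List.pyGetD lst (PySem.Int.mod (i - 1) n) 0 != 2) &&
           (PySem.List.pyGetD lst (PySem.Int.mod (i + 1) n) 0 != 2))))) := by
  induction is with
  | nil => rfl
  | cons i rest ih =>
    rw [solutionLoop, List.all_cons, ← ih]
    split_ifs with h1 h2 h3 <;> simp_all <;> tauto

lemma mod_prev (m n : Nat) (hm : m < n) :
    PySem.Int.mod ((m : Int) - 1) (n : Int) = ((if m = 0 then n - 1 else m - 1 : Nat) : Int) := by
  have hn : (0 : Int) < (n : Int) := by exact_mod_cast Nat.zero_lt_of_lt hm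
  rw [PySem.Int.mod_eq_emod_of_pos hn]
  rcases Nat.eq_zero_or_pos m with h0 | h0
  · subst h0
    rw [if_pos rfl]
    have h1 : (((0:Nat) : Int) - 1) = ((n : Int) - 1) + (n : Int) * (-1) := by push_cast; ring
    rw [h1, Int.add_mul_emod_self_left, Int.emod_eq_of_lt (by omega) (by omega)]; omega
  · rw [if_neg (by omega)]
    have h1 : ((m : Int) - 1) = ((m - 1 : Nat) : Int) := by omega
    rw [h1, Int.emod_eq_of_lt (by omega) (by omega)]

lemma mod_next (m n : Nat) (hm : m < n) :
    PySem.Int.mod ((m : Int) + 1) (n : Int) = ((if m + 1 = n then 0 else m + 1 : Nat) : Int) := by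
  have hn : (0 : Int) < (n : Int) := by exact_mod_cast Nat.zero_lt_of_lt hm
  rw [PySem.Int.mod_eq_emod_of_pos hn]
  by_cases h1 : m + 1 = n
  · rw [if_pos h1]
    have : ((m : Int) + 1) = (n : Int) := by omega
    simp [this]
  · rw [if_neg h1]
    have h2 : ((m : Int) + 1) = ((m + 1 : Nat) : Int) := by omega
    rw [h2, Int.emod_eq_of_lt (by omega) (by omega)]

lemma solution_eq_badB (lst : List Int) : solution lst = !BadB lst := by
  rw [solution, solutionLoop_eq_all, BadB]
  rw [PySem.List.pyRange_one]
  simp only [zero_add, sub_zero, Int.toNat_natCast, List.all_map, Function.comp_def]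
  rw [List.all_eq_not_any_not]
  simp only [Bool.not_not]
  congr 1
  rw [Bool.eq_iff_iff, List.any_eq_true, List.any_eq_true]
  have key : ∀ m, m < lst.length →
      (PySem.List.pyGetD lst (m : Int) 0 == 2 &&
          ((lst.length : Int) == 1 ||
            (PySem.List.pyGetD lst (PySem.Int.mod ((m : Int) - 1) (lst.length : Int)) 0 != 2 &&
              PySem.List.pyGetD lst (PySem.Int.mod ((m : Int) + 1) (lst.length : Int)) 0 != 2))) = badAtB lst m := by
    intro m hm
    rw [mod_prev m lst.length hm, mod_next m lst.length hm, badAtB]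
    have hc : ((lst.length : Int) == 1) = (lst.length == 1) := by
      by_cases h : lst.length = 1 <;> simp [h, Nat.cast_eq_one]
    simp only [PySem.List.pyGetD_natCast, hc]
  constructor
  · rintro ⟨m, hm, hp⟩
    exact ⟨m, hm, by rw [← key m (List.mem_range.mp hm)]; exact hp⟩
  · rintro ⟨m, hm, hp⟩
    exact ⟨m, hm, by rw [key m (List.mem_range.mp hm)]; exact hp⟩

lemma badB_all_twos (lst : List Int) (h : ∀ x ∈ lst, x = 2) :
    BadB lst = decide (lst.length = 1) := by
  have hget : ∀ i, i < lst.length → lst.getD i 0 = 2 := by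
    intro i hi
    rw [List.getD_eq_getElem _ _ hi]
    exact h _ (List.getElem_mem hi)
  by_cases h1 : lst.length = 1
  · rw [BadB, h1]
    have hb : badAtB lst 0 = true := by
      rw [badAtB, h1]
      have h0 := hget 0 (by omega)
      rw [List.getD_eq_getElem?_getD] at h0
      simp [h0]
    simp [List.range_one, hb]
  · rw [BadB, decide_eq_false h1]
    rw [List.any_eq_false]
    intro m hm
    rw [List.mem_range] at hm
    have hp : lst.getD (if m = 0 then lst.length - 1 else m - 1) 0 = 2 :=
      hget _ (by split_ifs <;> omega)
    rw [List.getD_eq_getElem?_getD] at hp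
    simp [badAtB, h1, hp]


lemma badB_eq_isoB (lst : List Int) (k : Nat) (hk : k < lst.length)
    (hkf : lst.getD k 0 ≠ 2) :
    BadB lst = IsoB (false :: (((lst.map (fun x => x == 2)).drop k ++ (lst.map (fun x => x == 2)).take k) ++ [false])) := by
  set n := lst.length with hn
  set twos := lst.map (fun x => x == 2) with htw
  set rot := twos.drop k ++ twos.take k with hrot
  have ltw : twos.length = n := by rw [htw, List.length_map, hn]
  have lrot : rot.length = n := by
    simp only [hrot, List.length_append, List.length_drop, List.length_take, ltw]; omega
  have TG : ∀ (i : Nat) (c : Bool), i < n → twos.getD i c = (lst.getD i 0 == 2) := by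
    intro i c hi
    simp only [List.getD_eq_getElem?_getD, htw, List.getElem?_map]
    rw [List.getElem?_eq_getElem (by omega : i < lst.length)]
    simp
  have RT : ∀ (m : Nat) (c : Bool), m < n →
      rot.getD m c = (lst.getD (if m + k < n then m + k else m + k - n) 0 == 2) := by
    intro m c hm
    by_cases hmk : m < n - k
    · rw [if_pos (by omega), hrot, List.getD_append _ _ _ _ (by rw [List.length_drop, ltw]; omega)]
      have : (twos.drop k).getD m c = twos.getD (k + m) c := by
        simp [List.getD_eq_getElem?_getD, List.getElem?_drop]
      rw [this, show k + m = m + k by omega, TG _ _ (by omega)]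
    · rw [if_neg (by omega), hrot,
          List.getD_append_right _ _ _ _ (by rw [List.length_drop, ltw]; omega)]
      rw [List.length_drop, ltw]
      have h1 : (twos.take k).getD (m - (n - k)) c = twos.getD (m - (n - k)) c := by
        simp only [List.getD_eq_getElem?_getD, List.getElem?_take]
        rw [if_pos (by omega)]
      rw [h1, show m - (n - k) = m + k - n by omega, TG _ _ (by omega)]
  set d := false :: (rot ++ [false]) with hd
  have ld : d.length = n + 2 := by simp [hd, lrot]
  have DG : ∀ (j : Nat) (c : Bool),
      d.getD j c = if j = 0 then false else if j = n + 1 then false else rot.getD (j - 1) c := by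
    intro j c
    match j with
    | 0 => simp [hd]
    | (j+1) =>
      rw [hd, List.getD_cons_succ, if_neg (by omega)]
      by_cases hj : j < n
      · rw [if_neg (by omega), List.getD_append _ _ _ _ (by omega), Nat.add_sub_cancel]
      · by_cases hj2 : j = n
        · rw [if_pos (by omega), hj2, List.getD_append_right _ _ _ _ (by omega), lrot]
          simp
        · rw [if_neg (by omega), Nat.add_sub_cancel,
              List.getD_eq_default _ _ (by rw [List.length_append, lrot]; simp; omega),
              List.getD_eq_default _ _ (by omega)]
  have hkfb : ∀ c, rot.getD 0 c = false := by
    intro c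
    rw [RT 0 c (by omega), if_pos (by omega)]
    simpa using hkf
  rw [BadB, IsoB, Bool.eq_iff_iff, List.any_eq_true, List.any_eq_true]
  constructor
  · rintro ⟨i, hi, hbad⟩
    rw [List.mem_range] at hi
    rw [badAtB] at hbad
    simp only [Bool.and_eq_true, Bool.or_eq_true, beq_iff_eq, bne_iff_ne] at hbad
    obtain ⟨h2, hrest⟩ := hbad
    have hik : i ≠ k := fun e => hkf (e ▸ h2)
    have hn1 : n ≠ 1 := by intro e; exact hik (by omega)
    rcases hrest with e | ⟨hprev, hnext⟩
    · exact absurd e hn1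
    refine ⟨if k < i then i - k else i + n - k, by rw [List.mem_range, ld]; split_ifs <;> omega, ?_⟩
    set j := if k < i then i - k else i + n - k with hj
    have hjb : 1 ≤ j ∧ j ≤ n - 1 := by rw [hj]; split_ifs <;> omega
    have hmid : d.getD (j+1) false = true := by
      rw [DG, if_neg (by omega), if_neg (by omega), Nat.add_sub_cancel,
          RT j false (by omega)]
      have : (if j + k < n then j + k else j + k - n) = i := by
        rw [hj]; split_ifs <;> omega
      rw [this]; simpa using h2
    have hpv : d.getD j true = false := by
      rw [DG, if_neg (by omega), if_neg (by omega), RT (j-1) true (by omega)]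
      have : (if (j-1) + k < n then (j-1) + k else (j-1) + k - n) = (if i = 0 then n - 1 else i - 1) := by
        rw [hj]; split_ifs <;> omega
      rw [this]; simpa using hprev
    have hnx : d.getD (j+2) true = false := by
      by_cases hje : j = n - 1
      · rw [DG, if_neg (by omega), if_pos (by omega)]
      · rw [DG, if_neg (by omega), if_neg (by omega),
            show j + 2 - 1 = j + 1 by omega, RT (j+1) true (by omega)]
        have : (if (j+1) + k < n then (j+1) + k else (j+1) + k - n) = (if i + 1 = n then 0 else i + 1) := by
          rw [hj]; split_ifs <;> omega
        rw [this]; simpa using hnext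
    simp only [Bool.and_eq_true, Bool.not_eq_eq_eq_not, Bool.not_true]
    exact ⟨⟨by simpa using hpv, by simpa using hmid⟩, by simpa using hnx⟩
  · rintro ⟨j, hjm, hpat⟩
    rw [List.mem_range, ld] at hjm
    simp only [Bool.and_eq_true, Bool.not_eq_eq_eq_not, Bool.not_true] at hpat
    obtain ⟨⟨hp1, hp2⟩, hp3⟩ := hpat
    have hjn : j < n := by
      by_contra hjge
      rw [DG] at hp2
      by_cases e0 : j + 1 = n + 1
      · rw [if_neg (by omega), if_pos e0] at hp2; exact absurd hp2 (by simp)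
      · rw [if_neg (by omega), if_neg e0, Nat.add_sub_cancel,
            List.getD_eq_default _ _ (by omega)] at hp2
        exact absurd hp2 (by simp)
    have hj1 : 1 ≤ j := by
      by_contra h0
      have e : j = 0 := by omega
      rw [DG, if_neg (by omega), if_neg (by omega), e] at hp2
      simp only [Nat.add_sub_cancel] at hp2
      rw [hkfb] at hp2
      exact absurd hp2 (by simp)
    refine ⟨if j + k < n then j + k else j + k - n, by rw [List.mem_range]; split_ifs <;> omega, ?_⟩
    set i := if j + k < n then j + k else j + k - n with hi
    have hilt : i < n := by rw [hi]; split_ifs <;> omega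
    have hik : i ≠ k := by rw [hi]; split_ifs <;> omega
    have h2 : lst.getD i 0 = 2 := by
      rw [DG, if_neg (by omega), if_neg (by omega), Nat.add_sub_cancel, RT j false hjn, ← hi] at hp2
      exact beq_iff_eq.mp hp2
    have hprev : lst.getD (if i = 0 then n - 1 else i - 1) 0 ≠ 2 := by
      rw [DG, if_neg (by omega), if_neg (by omega), RT (j-1) true (by omega)] at hp1
      have e : (if (j-1) + k < n then (j-1) + k else (j-1) + k - n) = (if i = 0 then n - 1 else i - 1) := by
        rw [hi]; split_ifs <;> omega
      rw [e] at hp1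
      simpa using hp1
    have hnext : lst.getD (if i + 1 = n then 0 else i + 1) 0 ≠ 2 := by
      by_cases hje : j = n - 1
      · have e : (if i + 1 = n then 0 else i + 1) = k := by rw [hi]; split_ifs <;> omega
        rw [e]; exact hkf
      · rw [DG, if_neg (by omega), if_neg (by omega),
            show j + 2 - 1 = j + 1 by omega, RT (j+1) true (by omega)] at hp3
        have e : (if (j+1) + k < n then (j+1) + k else (j+1) + k - n) = (if i + 1 = n then 0 else i + 1) := by
          rw [hi]; split_ifs <;> omega
        rw [e] at hp3
        simpa using hp3
    rw [badAtB]
    simp only [Bool.and_eq_true, Bool.or_eq_true, beq_iff_eq, bne_iff_ne]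
    exact ⟨h2, Or.inr ⟨hprev, hnext⟩⟩

lemma solution_eq_alt (lst : List Int) : solution lst = solution_alt lst := by
  rw [solution_eq_badB, solution_alt]
  by_cases hall : ((lst.map (fun x => x == 2)).all id = true)
  · rw [if_pos hall]
    have h2 : ∀ x ∈ lst, x = 2 := by
      intro x hx
      have := List.all_eq_true.mp hall _ (List.mem_map_of_mem hx)
      simpa using this
    rw [badB_all_twos lst h2]
    by_cases h1 : lst.length = 1
    · simp [h1]
    · have hc : ((lst.length : Int) ≠ 1) := by
        intro e; exact h1 (by exact_mod_cast e)
      simp [h1, hc]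
  · rw [if_neg hall]
    have hmem : false ∈ lst.map (fun x => x == 2) := by
      rw [Bool.not_eq_true, List.all_eq_false] at hall
      obtain ⟨b, hb, hpb⟩ := hall
      cases b
      · exact hb
      · simp at hpb
    have hsome := (PySem.List.index?_isSome_iff (lst.map (fun x => x == 2)) false).mpr hmem
    obtain ⟨k, hks⟩ := Option.isSome_iff_exists.mp hsome
    obtain ⟨hklt, hkv, -⟩ := PySem.List.getElem_of_index?_eq_some hks
    have hlt : k < lst.length := by simpa using hklt
    have hkf : lst.getD k 0 ≠ 2 := by
      intro e
      have hx : (lst.map (fun x => x == 2))[k]'hklt = true := by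
        rw [List.getElem_map]
        rw [List.getD_eq_getElem _ _ hlt] at e
        simp [e]
      rw [hkv] at hx
      simp at hx
    rw [hks]
    simp only [Option.getD_some]
    rw [PySem.List.slice_from_natCast, PySem.List.slice_to_natCast]
    have hr := runLoop_eq_isoB ((lst.map (fun x => x == 2)).drop k ++ (lst.map (fun x => x == 2)).take k) 0
    rw [show ((0:Nat) : Int) = (0 : Int) by simp] at hr
    rw [hr, badB_eq_isoB lst k hlt hkf]
    simp [List.replicate]


-- ===== VERDICT (by name: the statement is the Claim_ definition above) =====
theorem solution_spec : Claim_equal_solution := by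
  intro lst _
  unfold Spec_solution
  exact solution_eq_alt lst
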